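-- pv_equiv track=rewrite | github.com/diamantegut/sistema-almareia-mirapraia | app/services/stock_nfe_repository_service.py | _detect_nsu_gaps_values
-- ===== SOURCE A (Python) =====
-- from typing import Any, Dict, List, Optional, Tuple
--
-- def _detect_nsu_gaps_values(nsu_values: List[int]) -> List[int]:
--     if not nsu_values:
--         return []
--     ordered = sorted(set(nsu_values))
--     missing: List[int] = []
--     for idx in range(len(ordered) - 1):
--         current = ordered[idx]
--         nxt = ordered[idx + 1]
--         if nxt - current <= 1:
--             continue
--         for gap in range(current + 1, nxt):
--             missing.append(gap)
--     return missing
-- ===== SOURCE B (Python) =====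
-- from typing import List
--
--
-- def _detect_nsu_gaps_values(nsu_values: List[int]) -> List[int]:
--     if not nsu_values:
--         return []
--     present = set(nsu_values)
--     lo = min(present)
--     hi = max(present)
--     return [v for v in range(lo, hi + 1) if v not in present]
-- ===== Notes on version B (the rewrite author's own statement) =====
-- stated objective: simpler
-- what changed: Replaces the sort + pairwise adjacent-gap double loop with a single comprehension over the full span [min, max] filtered by set membership.
import Mathlib
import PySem

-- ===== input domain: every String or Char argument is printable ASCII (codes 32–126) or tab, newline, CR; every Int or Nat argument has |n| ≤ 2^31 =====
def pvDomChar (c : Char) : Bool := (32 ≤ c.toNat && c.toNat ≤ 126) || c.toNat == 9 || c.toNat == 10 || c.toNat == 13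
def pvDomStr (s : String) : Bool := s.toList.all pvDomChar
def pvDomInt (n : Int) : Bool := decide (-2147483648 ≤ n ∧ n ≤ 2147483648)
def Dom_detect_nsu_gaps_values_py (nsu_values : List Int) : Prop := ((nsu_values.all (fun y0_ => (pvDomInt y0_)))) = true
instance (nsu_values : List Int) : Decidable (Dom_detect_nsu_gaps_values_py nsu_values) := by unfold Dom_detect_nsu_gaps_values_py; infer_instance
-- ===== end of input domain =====

-- B replaces A's sort + pairwise adjacent-gap double loop with one filter of the
-- full span [min, max] by set membership (objective: simpler).

-- ===== PORT A =====
def detect_nsu_gaps_values_py (nsu_values : List Int) : List Int :=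
  if nsu_values = [] then []
  else
    let ordered := PySem.List.sorted (PySem.Set.ofList nsu_values) (fun x => x) false
    (PySem.List.pyRange 0 ((ordered.length : Int) - 1) 1).foldl
      (fun missing idx =>
        let current := PySem.List.pyGetD ordered idx 0
        let nxt := PySem.List.pyGetD ordered (idx + 1) 0
        if nxt - current ≤ 1 then missing
        else missing ++ PySem.List.pyRange (current + 1) nxt 1)
      []

-- ===== PORT B =====
def detect_nsu_gaps_values_py_alt (nsu_values : List Int) : List Int :=
  if nsu_values = [] then []
  else
    let present := PySem.Set.ofList nsu_values
    -- min()/max() of the nonempty set; getD's default is never used (present ≠ [])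
    let lo := (PySem.List.min? present (fun x => x)).getD 0
    let hi := (PySem.List.max? present (fun x => x)).getD 0
    (PySem.List.pyRange lo (hi + 1) 1).filter (fun v => !(PySem.Set.contains present v))

-- ===== PRECONDITION & SPEC =====
def Spec_detect_nsu_gaps_values_py (nsu_values : List Int) (out : List Int) : Prop := out = detect_nsu_gaps_values_py_alt nsu_values
instance (nsu_values : List Int) (out : List Int) : Decidable (Spec_detect_nsu_gaps_values_py nsu_values out) := by unfold Spec_detect_nsu_gaps_values_py; infer_instance

-- ===== CLAIM (what is proved, stated in full; the proofs are below) =====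
def Claim_equal_detect_nsu_gaps_values_py : Prop := ∀ (nsu_values : List Int), Dom_detect_nsu_gaps_values_py nsu_values → Spec_detect_nsu_gaps_values_py nsu_values (detect_nsu_gaps_values_py nsu_values)

-- ===== LEMMAS AND PROOFS =====

/-- Concatenation of the gap ranges between adjacent elements. -/
def pvGaps : List Int → List Int
  | a :: b :: t => PySem.List.pyRange (a + 1) b 1 ++ pvGaps (b :: t)
  | _ => []

theorem pvAuxFold (o : List Int) : ∀ (acc : List Int),
    (List.range (o.length - 1)).foldl
      (fun missing k =>
        if o.getD (k + 1) 0 - o.getD k 0 ≤ 1 then missing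
        else missing ++ PySem.List.pyRange (o.getD k 0 + 1) (o.getD (k + 1) 0) 1)
      acc = acc ++ pvGaps o := by
  induction o with
  | nil => intro acc; simp [pvGaps]
  | cons a rest ih =>
    intro acc
    match rest with
    | [] => simp [pvGaps]
    | b :: t =>
      have hlen : (a :: b :: t).length - 1 = t.length + 1 := by simp
      rw [hlen, List.range_succ_eq_map, List.foldl_cons, List.foldl_map]
      have hstep : (if (a :: b :: t).getD 1 0 - (a :: b :: t).getD 0 0 ≤ 1 then acc
          else acc ++ PySem.List.pyRange ((a :: b :: t).getD 0 0 + 1) ((a :: b :: t).getD 1 0) 1)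
          = acc ++ PySem.List.pyRange (a + 1) b 1 := by
        simp only [List.getD_cons_zero, List.getD_cons_succ]
        split_ifs with hle
        · rw [PySem.List.pyRange_one_eq_nil (by omega), List.append_nil]
        · rfl
      rw [hstep]
      have hbody : (fun (missing : List Int) (k : Nat) =>
          if (a :: b :: t).getD (k.succ + 1) 0 - (a :: b :: t).getD k.succ 0 ≤ 1 then missing
          else missing ++ PySem.List.pyRange ((a :: b :: t).getD k.succ 0 + 1) ((a :: b :: t).getD (k.succ + 1) 0) 1)
          = (fun (missing : List Int) (k : Nat) =>
          if (b :: t).getD (k + 1) 0 - (b :: t).getD k 0 ≤ 1 then missing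
          else missing ++ PySem.List.pyRange ((b :: t).getD k 0 + 1) ((b :: t).getD (k + 1) 0) 1) := by
        funext missing k
        simp
      have hlen2 : t.length = (b :: t).length - 1 := by simp
      rw [hbody, hlen2, ih]
      simp [pvGaps]

theorem pvFoldA_eq_gaps (o : List Int) :
    (PySem.List.pyRange 0 ((o.length : Int) - 1) 1).foldl
      (fun missing idx =>
        let current := PySem.List.pyGetD o idx 0
        let nxt := PySem.List.pyGetD o (idx + 1) 0
        if nxt - current ≤ 1 then missing
        else missing ++ PySem.List.pyRange (current + 1) nxt 1)
      [] = pvGaps o := by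
  rw [PySem.List.pyRange_one, List.foldl_map]
  have hn : ((o.length : Int) - 1 - 0).toNat = o.length - 1 := by omega
  rw [hn]
  have hbody : (fun (missing : List Int) (k : Nat) =>
      let current := PySem.List.pyGetD o ((0 : Int) + (k : Int)) 0
      let nxt := PySem.List.pyGetD o ((0 : Int) + (k : Int) + 1) 0
      if nxt - current ≤ 1 then missing
      else missing ++ PySem.List.pyRange (current + 1) nxt 1)
      = (fun (missing : List Int) (k : Nat) =>
      if o.getD (k + 1) 0 - o.getD k 0 ≤ 1 then missing
      else missing ++ PySem.List.pyRange (o.getD k 0 + 1) (o.getD (k + 1) 0) 1) := by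
    funext missing k
    have h1 : (0 : Int) + (k : Int) = ((k : Nat) : Int) := by omega
    have h2 : ((k : Nat) : Int) + 1 = (((k + 1 : Nat)) : Int) := by push_cast; ring
    rw [h1, h2]
    simp only [PySem.List.pyGetD_natCast]
  rw [hbody, pvAuxFold]
  simp

theorem pvLast_isMax (o : List Int) (h : o.Pairwise (· < ·)) (hne : o ≠ []) :
    ∀ x ∈ o, x ≤ o.getLast hne := by
  induction o with
  | nil => exact absurd rfl hne
  | cons a rest ih =>
    intro x hx
    match rest with
    | [] => simp at hx; simp [hx]
    | b :: t =>
      rw [List.getLast_cons (by simp)]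
      rcases List.mem_cons.mp hx with rfl | hx'
      · have hab : x < b := (List.pairwise_cons.mp h).1 b (by simp)
        have := ih (List.pairwise_cons.mp h).2 (by simp) b (by simp)
        omega
      · exact ih (List.pairwise_cons.mp h).2 (by simp) x hx'

theorem pvGaps_eq_filter (o : List Int) (h : o.Pairwise (· < ·)) (hne : o ≠ []) :
    pvGaps o = (PySem.List.pyRange (o.head hne) (o.getLast hne + 1) 1).filter
      (fun v => !(o.contains v)) := by
  induction o with
  | nil => exact absurd rfl hne
  | cons a rest ih =>
    match rest with
    | [] =>
      simp [pvGaps, PySem.List.pyRange_one_singleton]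
    | b :: t =>
      obtain ⟨hafold, hrest⟩ := List.pairwise_cons.mp h
      have hab : a < b := hafold b (by simp)
      have hL : b ≤ (b :: t).getLast (by simp) :=
        pvLast_isMax (b :: t) hrest (by simp) b (by simp)
      have hlast : (a :: b :: t).getLast hne = (b :: t).getLast (by simp) :=
        List.getLast_cons (by simp)
      have hsplit : PySem.List.pyRange a ((b :: t).getLast (by simp) + 1) 1
          = (a :: PySem.List.pyRange (a + 1) b 1) ++ PySem.List.pyRange b ((b :: t).getLast (by simp) + 1) 1 := by
        rw [← PySem.List.pyRange_one_cons hab]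
        exact PySem.List.pyRange_one_append a b _ (by omega) (by omega)
      simp only [List.head_cons, hlast, hsplit]
      rw [List.filter_append, List.filter_cons]
      have ha_in : ((a :: b :: t).contains a) = true := by simp
      have hmid : (PySem.List.pyRange (a + 1) b 1).filter (fun v => !((a :: b :: t).contains v))
          = PySem.List.pyRange (a + 1) b 1 := by
        apply List.filter_eq_self.mpr
        intro v hv
        have hv' := PySem.List.mem_pyRange_one.mp hv
        simp only [Bool.not_eq_true', List.contains_eq_mem, decide_eq_false_iff_not]
        intro hmem
        rcases List.mem_cons.mp hmem with rfl | hmem'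
        · omega
        rcases List.mem_cons.mp hmem' with rfl | hmem''
        · omega
        · have := hafold v (by simp [hmem''])
          have hbv : b < v := (List.pairwise_cons.mp hrest).1 v hmem''
          omega
      have hhigh : (PySem.List.pyRange b ((b :: t).getLast (by simp) + 1) 1).filter
            (fun v => !((a :: b :: t).contains v))
          = (PySem.List.pyRange b ((b :: t).getLast (by simp) + 1) 1).filter
            (fun v => !((b :: t).contains v)) := by
        apply List.filter_congr
        intro v hv
        have hv' := PySem.List.mem_pyRange_one.mp hv
        have hva : v ≠ a := by omega
        simp [List.contains_eq_mem, hva]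
      have ihx := ih hrest (by simp)
      simp only [List.head_cons] at ihx
      rw [hmid, hhigh, ← ihx]
      simp [pvGaps]

-- ===== VERDICT (by name: the statement is the Claim_ definition above) =====
theorem detect_nsu_gaps_values_py_spec : Claim_equal_detect_nsu_gaps_values_py := by
  intro nsu_values _
  unfold Spec_detect_nsu_gaps_values_py detect_nsu_gaps_values_py detect_nsu_gaps_values_py_alt
  by_cases hnil : nsu_values = []
  · simp [hnil]
  · simp only [if_neg hnil]
    set present := PySem.Set.ofList nsu_values with hpres
    set o := PySem.List.sorted present (fun x => x) false with ho
    have hpne : present ≠ [] := by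
      intro hcon
      rcases List.exists_mem_of_ne_nil nsu_values hnil with ⟨x, hx⟩
      have : x ∈ present := by rw [hpres]; exact (PySem.Set.mem_ofList nsu_values x).mpr hx
      simp [hcon] at this
    have hone : o ≠ [] := by
      intro hcon
      rw [ho, PySem.List.sorted_eq_nil_iff] at hcon
      exact hpne hcon
    have hpw : o.Pairwise (· < ·) := PySem.List.sorted_ofList_pairwise_lt nsu_values
    have hmemo : ∀ v : Int, v ∈ o ↔ v ∈ present := fun v =>
      PySem.List.mem_sorted present (fun x => x) false v
    -- min
    obtain ⟨m, hm⟩ : ∃ m, PySem.List.min? present (fun x => x) = some m := by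
      cases hmin : PySem.List.min? present (fun x => x) with
      | none =>
        rw [PySem.List.min?_eq_none_iff] at hmin
        exact absurd hmin hpne
      | some m => exact ⟨m, rfl⟩
    obtain ⟨M, hM⟩ : ∃ M, PySem.List.max? present (fun x => x) = some M := by
      cases hmax : PySem.List.max? present (fun x => x) with
      | none =>
        rw [PySem.List.max?_eq_none_iff] at hmax
        exact absurd hmax hpne
      | some M => exact ⟨M, rfl⟩
    have hhead : o.head hone = m := by
      obtain ⟨h0, tl, hcons⟩ := List.exists_cons_of_ne_nil hone
      have hsort_eq : PySem.List.sorted present (fun x => x) false = h0 :: tl := by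
        rw [← ho]; exact hcons
      have hle : h0 ≤ m := PySem.List.key_head_sorted_le present (fun x => x) hsort_eq
        m (PySem.List.min?_mem hm)
      have hge : m ≤ h0 := PySem.List.min?_isMin hm h0
        ((hmemo h0).mp (by rw [hcons]; simp))
      simp [hcons]; omega
    have hlast : o.getLast hone = M := by
      have h1 : o.getLast hone ≤ M := PySem.List.max?_isMax hM _
        ((hmemo _).mp (List.getLast_mem hone))
      have h2 : M ≤ o.getLast hone := pvLast_isMax o hpw hone M
        ((hmemo M).mpr (PySem.List.max?_mem hM))
      omega
    rw [pvFoldA_eq_gaps, pvGaps_eq_filter o hpw hone, hhead, hlast, hm, hM]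
    simp only [Option.getD_some]
    apply List.filter_congr
    intro v _
    have : (v ∈ o) ↔ (v ∈ present) := hmemo v
    simp only [PySem.Set.contains_eq_listContains, List.contains_eq_mem]
    simp [this]
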